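-- pv_equiv track=rewrite | github.com/FelipeAscencio/Backtracking_LP_Resolution | ReadyToRun/funciones.py | aproximacion1
-- ===== SOURCE A (Python) =====
-- def aproximacion1(maestros, num_grupos):
--     maestros_ordenados = sorted(maestros, key=lambda x: x[1], reverse=True)
--     resultado = [([], 0)] * num_grupos
--     for i in range(len(maestros_ordenados)):
--         guerrero, poder = maestros_ordenados[i]
--         indice_min = min(range(len(resultado)), key=lambda i: resultado[i][1])
--         guerreros, sumatoria = resultado[indice_min]
--         resultado[indice_min] = (guerreros + [guerrero], sumatoria + poder)
--     return resultado
-- ===== SOURCE B (Python) =====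
-- def aproximacion1(maestros, num_grupos):
--     orden = sorted(maestros, key=lambda x: x[1], reverse=True)
--     grupos = [[] for _ in range(num_grupos)]
--     sumas = [0] * num_grupos
--     # priority queue: list of (suma, indice) kept sorted ascending
--     cola = [(0, i) for i in range(num_grupos)]
--     for guerrero, poder in orden:
--         suma, i = cola.pop(0)
--         nueva = suma + poder
--         grupos[i].append(guerrero)
--         sumas[i] = nueva
--         par = (nueva, i)
--         lo, hi = 0, len(cola)
--         while lo < hi:
--             mid = (lo + hi) // 2
--             if cola[mid] < par:
--                 lo = mid + 1
--             else:
--                 hi = mid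
--         cola.insert(lo, par)
--     return list(zip(grupos, sumas))
-- ===== Notes on version B (the rewrite author's own statement) =====
-- stated objective: faster
-- what changed: Replaces A's per-item linear argmin scan over all group sums with a priority queue: a list of (sum, index) pairs kept sorted, popping the front and re-inserting the updated pair at a binary-searched position; groups and sums are kept in separate lists and zipped at the end.
import Mathlib
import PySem

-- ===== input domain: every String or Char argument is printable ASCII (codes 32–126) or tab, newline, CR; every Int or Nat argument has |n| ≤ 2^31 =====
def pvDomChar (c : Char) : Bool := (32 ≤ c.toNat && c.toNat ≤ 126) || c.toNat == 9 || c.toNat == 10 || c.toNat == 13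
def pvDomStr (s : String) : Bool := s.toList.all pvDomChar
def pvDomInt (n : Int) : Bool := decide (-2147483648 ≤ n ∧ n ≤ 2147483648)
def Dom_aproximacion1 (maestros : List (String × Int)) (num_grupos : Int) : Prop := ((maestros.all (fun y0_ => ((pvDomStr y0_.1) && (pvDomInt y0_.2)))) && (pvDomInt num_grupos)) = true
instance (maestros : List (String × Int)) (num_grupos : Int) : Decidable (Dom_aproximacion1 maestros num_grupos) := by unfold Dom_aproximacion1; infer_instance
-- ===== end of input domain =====

-- B replaces A's per-item linear argmin scan over the group sums by a priority queue:
-- a list of (sum, index) pairs kept sorted, popped at the front and re-filled by binary insort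
-- (measurably faster; B builds groups and sums in separate lists zipped at the end).

-- ===== PORT A =====
-- one loop iteration of A: put the warrior into the first group of minimal sum
def pasoA (res : List (List String × Int)) (gp : String × Int) : List (List String × Int) :=
  match PySem.List.min? (PySem.List.pyRange 0 (res.length : Int) 1)
      (fun j => (PySem.List.pyGetD res j ([], 0)).2) with
  | none => res   -- Python: min() of an empty sequence raises ValueError; excluded by Pre_
  | some j =>
      let gs := PySem.List.pyGetD res j ([], 0)
      PySem.List.pySetD res j (gs.1 ++ [gp.1], gs.2 + gp.2)

def aproximacion1 (maestros : List (String × Int)) (num_grupos : Int) : List (List String × Int) :=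
  let mo := PySem.List.sorted maestros (fun x => x.2) true
  (PySem.List.pyRange 0 (mo.length : Int) 1).foldl
    (fun res i => pasoA res (PySem.List.pyGetD mo i ("", 0)))
    (PySem.List.pyRepeat [([], 0)] num_grupos)

-- ===== PORT B =====
-- Python tuple comparison (suma, indice) < (suma', indice') on int pairs: lexicographic
def pvLex (a b : Int × Int) : Bool := a.1 < b.1 || (a.1 == b.1 && a.2 < b.2)

-- the 'while lo < hi' binary search of Source B, step for step
def pvBusca (cola : List (Int × Int)) (par : Int × Int) (lo hi : Int) : Int :=
  if _h : lo < hi then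
    let mid := PySem.Int.floordiv (lo + hi) 2
    if pvLex (PySem.List.pyGetD cola mid (0, 0)) par then pvBusca cola par (mid + 1) hi
    else pvBusca cola par lo mid
  else lo
termination_by (hi - lo).toNat
decreasing_by
  · have h1 : lo ≤ PySem.Int.floordiv (lo + hi) 2 :=
      (PySem.Int.le_floordiv_iff_mul_le (by norm_num)).mpr (by omega)
    omega
  · have h2 : PySem.Int.floordiv (lo + hi) 2 < hi :=
      (PySem.Int.floordiv_lt_iff_lt_mul (by norm_num)).mpr (by omega)
    omega

-- one loop iteration of Source B: pop the front of the queue, update, binary insort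
def pasoB (st : List (List String) × List Int × List (Int × Int)) (gp : String × Int) :
    List (List String) × List Int × List (Int × Int) :=
  match st with
  | (grupos, sumas, cola) =>
    match cola with
    | [] => (grupos, sumas, cola)   -- Python: pop(0) raises IndexError; excluded by Pre_
    | (suma, i) :: resto =>
        let nueva := suma + gp.2
        let grupos' := PySem.List.pySetD grupos i (PySem.List.pyGetD grupos i [] ++ [gp.1])
        let sumas' := PySem.List.pySetD sumas i nueva
        let lo := pvBusca resto (nueva, i) 0 (resto.length : Int)
        (grupos', sumas', PySem.List.insert resto lo (nueva, i))

def aproximacion1_alt (maestros : List (String × Int)) (num_grupos : Int) : List (List String × Int) :=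
  let orden := PySem.List.sorted maestros (fun x => x.2) true
  let st := orden.foldl pasoB
    ((PySem.List.pyRange 0 num_grupos 1).map (fun _ => ([] : List String)),
     PySem.List.pyRepeat [(0 : Int)] num_grupos,
     (PySem.List.pyRange 0 num_grupos 1).map (fun i => ((0 : Int), i)))
  st.1.zip st.2.1

-- ===== PRECONDITION & SPEC =====
-- Pre_ excludes exactly the inputs where Python A raises: with no groups (num_grupos ≤ 0) and a
-- nonempty maestros list, A's min() over an empty range raises ValueError (B's pop(0), IndexError).
def Pre_aproximacion1 (maestros : List (String × Int)) (num_grupos : Int) : Prop :=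
  maestros = [] ∨ 1 ≤ num_grupos
instance (maestros : List (String × Int)) (num_grupos : Int) : Decidable (Pre_aproximacion1 maestros num_grupos) := by unfold Pre_aproximacion1; infer_instance

def pvWitness_aproximacion1 : (List (String × Int)) × Int := ([("ana", 3), ("bo", 1), ("ci", 2)], 2)

def Spec_aproximacion1 (maestros : List (String × Int)) (num_grupos : Int) (out : List (List String × Int)) : Prop := out = aproximacion1_alt maestros num_grupos
instance (maestros : List (String × Int)) (num_grupos : Int) (out : List (List String × Int)) : Decidable (Spec_aproximacion1 maestros num_grupos out) := by unfold Spec_aproximacion1; infer_instance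

-- ===== CLAIM (what is proved, stated in full; the proofs are below) =====
def Claim_equal_aproximacion1 : Prop := ∀ (maestros : List (String × Int)) (num_grupos : Int), Dom_aproximacion1 maestros num_grupos → Pre_aproximacion1 maestros num_grupos → Spec_aproximacion1 maestros num_grupos (aproximacion1 maestros num_grupos)

-- ===== LEMMAS AND PROOFS =====

-- the queue contents B must hold: one (sum, index) pair per group, indices starting at n
def qOf (l : List Int) (n : Int) : List (Int × Int) :=
  match l with
  | [] => []
  | s :: t => (s, n) :: qOf t (n + 1)

def InvB (grupos : List (List String)) (sumas : List Int) (cola : List (Int × Int)) : Prop :=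
  grupos.length = sumas.length ∧
  cola.Pairwise (fun a b => pvLex a b = true) ∧
  cola.Perm (qOf sumas 0)

lemma pvLex_trans {a b c : Int × Int} (h1 : pvLex a b = true) (h2 : pvLex b c = true) :
    pvLex a c = true := by
  simp only [pvLex, Bool.or_eq_true, Bool.and_eq_true, decide_eq_true_eq, beq_iff_eq] at *
  omega

lemma pvLex_total {a b : Int × Int} (hne : a.2 ≠ b.2) (h : pvLex a b = false) :
    pvLex b a = true := by
  simp only [pvLex, Bool.or_eq_false_iff, Bool.or_eq_true, Bool.and_eq_false_iff,
    Bool.and_eq_true, decide_eq_true_eq, decide_eq_false_iff_not, beq_iff_eq, beq_eq_false_iff_ne] at *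
  omega

lemma mem_qOf {p : Int × Int} : ∀ (l : List Int) (n : Int),
    p ∈ qOf l n ↔ ∃ m : Nat, m < l.length ∧ p = (l.getD m 0, n + m) := by
  intro l
  induction l with
  | nil => intro n; simp [qOf]
  | cons s t ih =>
      intro n
      simp only [qOf, List.mem_cons, ih, List.length_cons]
      constructor
      · rintro (rfl | ⟨m, hm, rfl⟩)
        · exact ⟨0, by omega, by simp⟩
        · exact ⟨m + 1, by omega, by simp; ring_nf⟩
      · rintro ⟨m, hm, rfl⟩
        cases m with
        | zero => left; simp
        | succ m => right; exact ⟨m, by omega, by simp; ring_nf⟩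

lemma snd_le_of_mem_qOf : ∀ (l : List Int) (n : Int), ∀ p ∈ qOf l n, n ≤ p.2 := by
  intro l
  induction l with
  | nil => intro n p hp; simp [qOf] at hp
  | cons s t ih =>
      intro n p hp
      rcases (List.mem_cons).1 hp with rfl | hp
      · simp
      · have := ih (n + 1) p hp; omega

lemma pairwise_snd_qOf : ∀ (l : List Int) (n : Int),
    (qOf l n).Pairwise (fun a b => a.2 < b.2) := by
  intro l
  induction l with
  | nil => intro n; simp [qOf]
  | cons s t ih =>
      intro n
      refine List.pairwise_cons.2 ⟨?_, ih (n + 1)⟩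
      intro p hp
      have := snd_le_of_mem_qOf t (n + 1) p hp
      simpa using by omega

lemma qOf_decomp : ∀ (l : List Int) (n : Int) (i : Nat), i < l.length →
    qOf l n = (qOf l n).take i ++ (l.getD i 0, n + i) :: (qOf l n).drop (i + 1) := by
  intro l
  induction l with
  | nil => intro n i h; simp at h
  | cons s t ih =>
      intro n i h
      cases i with
      | zero => simp [qOf]
      | succ i =>
          simp only [qOf, List.take_succ_cons, List.drop_succ_cons, List.getD_cons_succ,
            List.cons_append, List.cons.injEq, true_and]
          have := ih (n + 1) i (by simpa using h)
          rw [show n + (↑(i + 1) : Int) = (n + 1) + ↑i by push_cast; ring]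
          exact this

lemma qOf_set (v : Int) : ∀ (l : List Int) (n : Int) (i : Nat), i < l.length →
    qOf (l.set i v) n = (qOf l n).take i ++ (v, n + i) :: (qOf l n).drop (i + 1) := by
  intro l
  induction l with
  | nil => intro n i h; simp at h
  | cons s t ih =>
      intro n i h
      cases i with
      | zero => simp [qOf]
      | succ i =>
          simp only [List.set_cons_succ, qOf, List.take_succ_cons, List.drop_succ_cons,
            List.cons_append, List.cons.injEq, true_and]
          have := ih (n + 1) i (by simpa using h)
          rw [show n + (↑(i + 1) : Int) = (n + 1) + ↑i by push_cast; ring]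
          exact this

lemma zip_set {α β : Type} : ∀ (a : List α) (b : List β) (i : Nat) (x : α) (y : β),
    (a.set i x).zip (b.set i y) = (a.zip b).set i (x, y) := by
  intro a
  induction a with
  | nil => intro b i x y; simp
  | cons a0 at_ ih =>
      intro b i x y
      cases b with
      | nil => simp
      | cons b0 bt =>
          cases i with
          | zero => simp
          | succ i => simp [ih]

-- min(range(n), key=f) is the least index attaining the minimum
lemma minRange (n : Int) (f : Int → Int) (i : Int) (h0 : 0 ≤ i) (hn : i < n)
    (hle : ∀ j, 0 ≤ j → j < n → f i ≤ f j) (hlt : ∀ j, 0 ≤ j → j < i → f i < f j) :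
    PySem.List.min? (PySem.List.pyRange 0 n 1) f = some i := by
  have hsplit : PySem.List.pyRange 0 n 1 = PySem.List.pyRange 0 i 1 ++ PySem.List.pyRange i n 1 :=
    PySem.List.pyRange_one_append 0 i n h0 (le_of_lt hn)
  have hcons : PySem.List.pyRange i n 1 = i :: PySem.List.pyRange (i + 1) n 1 :=
    PySem.List.pyRange_one_cons hn
  have main : ∀ g : Option Int → Int → Option Int,
      (∀ x, g none x = some x) →
      (∀ m x, g (some m) x = if f x < f m then some x else some m) →
      (PySem.List.pyRange 0 n 1).foldl g none = some i := by
    intro g hg1 hg2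
    rw [hsplit, List.foldl_append, hcons, List.foldl_cons]
    have hstay : ∀ (l : List Int) (acc : Option Int), acc = some i → (∀ x ∈ l, ¬ f x < f i) →
        l.foldl g acc = some i := by
      intro l
      induction l with
      | nil => intro acc h _; simpa using h
      | cons x t ih =>
          intro acc h hx
          subst h
          rw [List.foldl_cons, hg2]
          exact ih _ (by simp [if_neg (hx x (by simp))]) (fun y hy => hx y (by simp [hy]))
    have hrest : ∀ x ∈ PySem.List.pyRange (i + 1) n 1, ¬ f x < f i := by
      intro x hx
      have := (PySem.List.mem_pyRange_one).1 hx
      have := hle x (by omega) (by omega)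
      omega
    have hcases : ∀ (l : List Int) (acc : Option Int),
        l.foldl g acc = acc ∨ ∃ m ∈ l, l.foldl g acc = some m := by
      intro l
      induction l with
      | nil => intro acc; left; rfl
      | cons x t ih =>
          intro acc
          rw [List.foldl_cons]
          rcases ih (g acc x) with h | ⟨m, hm, h⟩
          · rw [h]
            match acc with
            | none => exact Or.inr ⟨x, by simp, hg1 x⟩
            | some m =>
                rw [hg2]
                by_cases hfx : f x < f m
                · exact Or.inr ⟨x, by simp, by simp [if_pos hfx]⟩
                · left; simp [if_neg hfx]
          · exact Or.inr ⟨m, by simp [hm], h⟩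
    rcases hcases (PySem.List.pyRange 0 i 1) none with h | ⟨m, hm, h⟩
    · rw [h, hg1]
      exact hstay _ _ rfl hrest
    · rw [h, hg2]
      have hb := (PySem.List.mem_pyRange_one).1 hm
      have hfi : f i < f m := hlt m hb.1 hb.2
      exact hstay _ _ (by simp [if_pos hfi]) hrest
  simp only [PySem.List.min?]
  exact main _ (fun x => rfl) (fun m x => rfl)

lemma pvBusca_spec (cola : List (Int × Int)) (par : Int × Int)
    (hpw : cola.Pairwise (fun a b => pvLex a b = true)) :
    ∀ (d : Nat) (lo hi : Int), (hi - lo).toNat ≤ d → 0 ≤ lo → lo ≤ hi → hi ≤ (cola.length : Int) →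
    (∀ j : Nat, (j : Int) < lo → j < cola.length → pvLex (cola.getD j (0, 0)) par = true) →
    (∀ j : Nat, hi ≤ (j : Int) → j < cola.length → pvLex (cola.getD j (0, 0)) par = false) →
    0 ≤ pvBusca cola par lo hi ∧ pvBusca cola par lo hi ≤ (cola.length : Int) ∧
    (∀ j : Nat, (j : Int) < pvBusca cola par lo hi → j < cola.length →
      pvLex (cola.getD j (0, 0)) par = true) ∧
    (∀ j : Nat, pvBusca cola par lo hi ≤ (j : Int) → j < cola.length →
      pvLex (cola.getD j (0, 0)) par = false) := by
  have hpwg := (List.pairwise_iff_getElem).1 hpw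
  intro d
  induction d with
  | zero =>
      intro lo hi hd h0 hlh hhl hbelow habove
      have hlo : lo = hi := by omega
      rw [pvBusca, dif_neg (show ¬ lo < hi by omega)]
      exact ⟨h0, by omega, fun j hj hjl => hbelow j hj hjl,
        fun j hj hjl => habove j (by omega) hjl⟩
  | succ d ih =>
      intro lo hi hd h0 hlh hhl hbelow habove
      by_cases hlt : lo < hi
      · rw [pvBusca, dif_pos hlt]
        dsimp only
        have hmid1 : lo ≤ PySem.Int.floordiv (lo + hi) 2 :=
          (PySem.Int.le_floordiv_iff_mul_le (by norm_num)).mpr (by omega)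
        have hmid2 : PySem.Int.floordiv (lo + hi) 2 < hi :=
          (PySem.Int.floordiv_lt_iff_lt_mul (by norm_num)).mpr (by omega)
        set mid := PySem.Int.floordiv (lo + hi) 2 with hmiddef
        have hmidnat : (mid.toNat : Int) = mid := Int.toNat_of_nonneg (by omega)
        have hmidlen : mid.toNat < cola.length := by omega
        have hget : PySem.List.pyGetD cola mid (0, 0) = cola.getD mid.toNat (0, 0) := by
          rw [← hmidnat, PySem.List.pyGetD_natCast, Int.toNat_natCast]
        rw [hget]
        by_cases hP : pvLex (cola.getD mid.toNat (0, 0)) par = true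
        · rw [if_pos hP]
          refine ih (mid + 1) hi (by omega) (by omega) (by omega) hhl ?_ habove
          intro j hj hjl
          by_cases hjlo : (j : Int) < lo
          · exact hbelow j hjlo hjl
          · rcases Nat.lt_or_ge j mid.toNat with hjm | hjm
            · have hrel := hpwg j mid.toNat hjl hmidlen hjm
              rw [List.getD_eq_getElem _ _ hjl, List.getD_eq_getElem _ _ hmidlen] at *
              exact pvLex_trans hrel hP
            · have : j = mid.toNat := by omega
              subst this
              exact hP
        · rw [if_neg hP]
          refine ih lo mid (by omega) h0 (by omega) (by omega) hbelow ?_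
          intro j hj hjl
          rcases Nat.lt_or_ge mid.toNat j with hjm | hjm
          · rcases hb : pvLex (cola.getD j (0, 0)) par with _ | _
            · rfl
            · exfalso
              have hrel := hpwg mid.toNat j hmidlen hjl hjm
              rw [List.getD_eq_getElem _ _ hjl, List.getD_eq_getElem _ _ hmidlen] at *
              exact hP (pvLex_trans hrel hb)
          · have : j = mid.toNat := by omega
            subst this
            exact Bool.eq_false_iff.2 (fun hc => hP hc)
      · rw [pvBusca, dif_neg hlt]
        have hlo : lo = hi := by omega
        exact ⟨h0, by omega, fun j hj hjl => hbelow j hj hjl,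
          fun j hj hjl => habove j (by omega) hjl⟩


lemma pairwise_insert_sorted {R : Int × Int → Int × Int → Prop} (l : List (Int × Int))
    (a : Int × Int) (n : Nat) (hpw : l.Pairwise R)
    (h1 : ∀ (j : Nat), j < n → j < l.length → R (l.getD j (0, 0)) a)
    (h2 : ∀ (j : Nat), n ≤ j → j < l.length → R a (l.getD j (0, 0))) :
    (l.take n ++ a :: l.drop n).Pairwise R := by
  have hpwg := (List.pairwise_iff_getElem).1 hpw
  have h1' : ∀ (j : Nat) (hjl : j < l.length), j < n → R l[j] a := by
    intro j hjl hjn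
    have := h1 j hjn hjl
    rwa [List.getD_eq_getElem _ _ hjl] at this
  have h2' : ∀ (j : Nat) (hjl : j < l.length), n ≤ j → R a l[j] := by
    intro j hjl hjn
    have := h2 j hjn hjl
    rwa [List.getD_eq_getElem _ _ hjl] at this
  rw [List.pairwise_append]
  refine ⟨hpw.sublist (List.take_sublist n l), ?_, ?_⟩
  · rw [List.pairwise_cons]
    refine ⟨?_, hpw.sublist (List.drop_sublist _ _)⟩
    intro b hb
    obtain ⟨j, hj, rfl⟩ := List.mem_iff_getElem.1 hb
    rw [List.getElem_drop]
    exact h2' _ _ (by omega)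
  · intro x hx y hy
    obtain ⟨j, hj, rfl⟩ := List.mem_iff_getElem.1 hx
    have hjn : j < n := by
      have := List.length_take_le n l
      simp [List.length_take] at hj
      omega
    have hjl : j < l.length := by
      simp [List.length_take] at hj
      omega
    rw [List.getElem_take]
    rcases List.mem_cons.1 hy with rfl | hy
    · exact h1' _ _ hjn
    · obtain ⟨m, hm, rfl⟩ := List.mem_iff_getElem.1 hy
      rw [List.getElem_drop]
      exact hpwg j (n + m) hjl (by simp [List.length_drop] at hm; omega) (by omega)

-- one loop iteration: A's step on the zipped state equals B's step, and B's invariant is kept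
lemma step_sim (grupos : List (List String)) (sumas : List Int) (cola : List (Int × Int))
    (gp : String × Int) (h : InvB grupos sumas cola) :
    pasoA (grupos.zip sumas) gp =
      (pasoB (grupos, sumas, cola) gp).1.zip (pasoB (grupos, sumas, cola) gp).2.1 ∧
    InvB (pasoB (grupos, sumas, cola) gp).1 (pasoB (grupos, sumas, cola) gp).2.1
      (pasoB (grupos, sumas, cola) gp).2.2 := by
  obtain ⟨hlen, hpw, hperm⟩ := h
  match cola with
  | [] =>
      have hq : qOf sumas 0 = [] := hperm.symm.eq_nil
      have hsum : sumas = [] := by cases sumas with | nil => rfl | cons a t => simp [qOf] at hq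
      subst hsum
      have hgr : grupos = [] := List.eq_nil_of_length_eq_zero hlen
      subst hgr
      refine ⟨?_, ⟨rfl, List.Pairwise.nil, List.Perm.refl _⟩⟩
      show pasoA [] gp = [].zip ([] : List Int)
      simp [pasoA, PySem.List.min?, PySem.List.pyRange_one_eq_nil]
  | (s, i) :: resto =>
      -- identify the head of the queue
      have hmem : (s, i) ∈ qOf sumas 0 := hperm.subset (List.mem_cons_self)
      obtain ⟨m, hm, heq⟩ := (mem_qOf sumas 0).1 hmem
      have hi : i = (m : Int) := by simpa using congrArg Prod.snd heq
      have hs : s = sumas.getD m 0 := by simpa using congrArg Prod.fst heq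
      -- distinct queue indices
      have hnodup : (((s, i) :: resto).map (·.2)).Nodup := by
        refine (hperm.map (·.2)).nodup_iff.2 ?_
        exact ((List.pairwise_map.2 (pairwise_snd_qOf sumas 0)).imp ne_of_lt)
      have hsnd : ∀ c ∈ resto, c.2 ≠ i := by
        intro c hc
        have h1 := (List.pairwise_cons.1 hnodup).1
        exact fun hcontra => (h1 c.2 (List.mem_map_of_mem hc)) hcontra.symm
      -- every other group's pair sits behind the head
      have hforall : ∀ j : Nat, j < sumas.length → j ≠ m →
          pvLex (s, i) (sumas.getD j 0, (j : Int)) = true := by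
        intro j hj hjm
        have hjq : (sumas.getD j 0, (j : Int)) ∈ qOf sumas 0 :=
          (mem_qOf sumas 0).2 ⟨j, hj, by simp⟩
        have hjc := hperm.symm.subset hjq
        rcases List.mem_cons.1 hjc with hhd | htl
        · exfalso
          have : (j : Int) = i := by simpa using congrArg Prod.snd hhd
          rw [hi] at this
          exact hjm (by exact_mod_cast this)
        · exact (List.pairwise_cons.1 hpw).1 _ htl
      have hle : ∀ j : Nat, j < sumas.length → s ≤ sumas.getD j 0 := by
        intro j hj
        by_cases hjm : j = m
        · subst hjm; omega
        · have := hforall j hj hjm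
          simp only [pvLex, Bool.or_eq_true, Bool.and_eq_true, decide_eq_true_eq,
            beq_iff_eq] at this
          omega
      have hltm : ∀ j : Nat, j < m → s < sumas.getD j 0 := by
        intro j hj
        have hjlen : j < sumas.length := by omega
        have := hforall j hjlen (by omega)
        simp only [pvLex, Bool.or_eq_true, Bool.and_eq_true, decide_eq_true_eq,
          beq_iff_eq, hi] at this
        rcases this with h' | ⟨_, h'⟩
        · exact h'
        · exfalso; omega
      -- A's argmin is m
      have hreslen : (grupos.zip sumas).length = sumas.length := by
        simp [List.length_zip, hlen]
      have hgetres : ∀ j : Nat, j < sumas.length →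
          PySem.List.pyGetD (grupos.zip sumas) (j : Int) ([], 0) =
            (grupos.getD j [], sumas.getD j 0) := by
        intro j hj
        have hjz : j < (grupos.zip sumas).length := by omega
        rw [PySem.List.pyGetD_natCast, List.getD_eq_getElem _ _ hjz, List.getElem_zip,
          List.getD_eq_getElem _ _ (by omega), List.getD_eq_getElem _ _ (by omega)]
      have hmin : PySem.List.min? (PySem.List.pyRange 0 ((grupos.zip sumas).length : Int) 1)
          (fun j => (PySem.List.pyGetD (grupos.zip sumas) j ([], 0)).2) = some (m : Int) := by
        apply minRange _ _ _ (by omega) (by omega)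
        · intro j hj0 hjn
          have hj : j = ((j.toNat : Nat) : Int) := by omega
          rw [hj, hgetres m hm, hgetres j.toNat (by omega)]
          have := hle j.toNat (by omega)
          rw [hs] at this
          simpa using this
        · intro j hj0 hjm
          have hj : j = ((j.toNat : Nat) : Int) := by omega
          rw [hj, hgetres m hm, hgetres j.toNat (by omega)]
          have := hltm j.toNat (by omega)
          rw [hs] at this
          simpa using this
      -- reduce A's step
      have hA : pasoA (grupos.zip sumas) gp =
          (grupos.set m (grupos.getD m [] ++ [gp.1])).zip (sumas.set m (s + gp.2)) := by
        simp only [pasoA, hmin]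
        rw [hgetres m hm]
        rw [show ((m : Nat) : Int) = (((m : Nat) : Int)) from rfl]
        rw [PySem.List.pySetD_natCast]
        rw [← zip_set, ← hs]
      -- reduce B's step
      have hB : pasoB (grupos, sumas, (s, i) :: resto) gp =
          (grupos.set m (grupos.getD m [] ++ [gp.1]), sumas.set m (s + gp.2),
            PySem.List.insert resto
              (pvBusca resto (s + gp.2, i) 0 (resto.length : Int)) (s + gp.2, i)) := by
        show (PySem.List.pySetD grupos i (PySem.List.pyGetD grupos i [] ++ [gp.1]),
          PySem.List.pySetD sumas i (s + gp.2),
          PySem.List.insert resto (pvBusca resto (s + gp.2, i) 0 (resto.length : Int))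
            (s + gp.2, i)) = _
        rw [hi, PySem.List.pyGetD_natCast, PySem.List.pySetD_natCast, PySem.List.pySetD_natCast]
      rw [hB]
      refine ⟨by rw [hA], ?_, ?_, ?_⟩
      · simp [hlen]
      -- the new queue is still sorted and still holds one pair per group
      · have hpwr := (List.pairwise_cons.1 hpw).2
        obtain ⟨hlo0, hlolen, hbel, habv⟩ := pvBusca_spec resto (s + gp.2, i) hpwr
          resto.length 0 (resto.length : Int) (by omega) (by omega) (by omega) (by omega)
          (by intro j hj _; exact absurd hj (by omega))
          (by intro j hj hjl; exact absurd hj (by omega))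
        have hloeq : ((pvBusca resto (s + gp.2, i) 0 (resto.length : Int)).toNat : Int) =
            pvBusca resto (s + gp.2, i) 0 (resto.length : Int) := Int.toNat_of_nonneg hlo0
        have hins : PySem.List.insert resto (pvBusca resto (s + gp.2, i) 0 (resto.length : Int))
            (s + gp.2, i) =
            resto.take (pvBusca resto (s + gp.2, i) 0 (resto.length : Int)).toNat ++
              (s + gp.2, i) :: resto.drop (pvBusca resto (s + gp.2, i) 0 (resto.length : Int)).toNat := by
          rw [← hloeq, PySem.List.insert_natCast _ _ _ (by omega), Int.toNat_natCast]
        rw [hins]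
        refine pairwise_insert_sorted resto (s + gp.2, i) _ hpwr ?_ ?_
        · intro j hj hjl
          exact hbel j (by omega) hjl
        · intro j hj hjl
          refine pvLex_total ?_ (habv j (by omega) hjl)
          have hmemj : resto.getD j (0, 0) ∈ resto := by
            rw [List.getD_eq_getElem _ _ hjl]
            exact List.getElem_mem hjl
          exact hsnd _ hmemj
      · have hpwr := (List.pairwise_cons.1 hpw).2
        obtain ⟨hlo0, hlolen, hbel, habv⟩ := pvBusca_spec resto (s + gp.2, i) hpwr
          resto.length 0 (resto.length : Int) (by omega) (by omega) (by omega) (by omega)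
          (by intro j hj _; exact absurd hj (by omega))
          (by intro j hj hjl; exact absurd hj (by omega))
        have hloeq : ((pvBusca resto (s + gp.2, i) 0 (resto.length : Int)).toNat : Int) =
            pvBusca resto (s + gp.2, i) 0 (resto.length : Int) := Int.toNat_of_nonneg hlo0
        have hins : PySem.List.insert resto (pvBusca resto (s + gp.2, i) 0 (resto.length : Int))
            (s + gp.2, i) =
            resto.take (pvBusca resto (s + gp.2, i) 0 (resto.length : Int)).toNat ++
              (s + gp.2, i) :: resto.drop (pvBusca resto (s + gp.2, i) 0 (resto.length : Int)).toNat := by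
          rw [← hloeq, PySem.List.insert_natCast _ _ _ (by omega), Int.toNat_natCast]
        have hqset := qOf_set (s + gp.2) sumas 0 m hm
        have hqdec := qOf_decomp sumas 0 m hm
        simp only [zero_add] at hqset hqdec
        rw [← hs, ← hi] at hqdec
        rw [← hi] at hqset
        -- resto matches the rest of the groups
        have hresto : resto.Perm ((qOf sumas 0).take m ++ (qOf sumas 0).drop (m + 1)) := by
          have h1 : ((s, i) :: resto).Perm
              ((s, i) :: ((qOf sumas 0).take m ++ (qOf sumas 0).drop (m + 1))) := by
            have h2 : ((s, i) :: resto).Perm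
                ((qOf sumas 0).take m ++ (s, i) :: (qOf sumas 0).drop (m + 1)) := by
              rw [← hqdec]; exact hperm
            exact h2.trans List.perm_middle
          exact h1.cons_inv
        rw [hins, hqset]
        have e0 : resto.take (pvBusca resto (s + gp.2, i) 0 (resto.length : Int)).toNat ++
            resto.drop (pvBusca resto (s + gp.2, i) 0 (resto.length : Int)).toNat = resto :=
          List.take_append_drop _ _
        have e1 : (resto.take (pvBusca resto (s + gp.2, i) 0 (resto.length : Int)).toNat ++
            (s + gp.2, i) :: resto.drop (pvBusca resto (s + gp.2, i) 0 (resto.length : Int)).toNat).Perm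
            ((s + gp.2, i) :: resto) := by
          have h := List.perm_middle (a := (s + gp.2, i))
            (l₁ := resto.take (pvBusca resto (s + gp.2, i) 0 (resto.length : Int)).toNat)
            (l₂ := resto.drop (pvBusca resto (s + gp.2, i) 0 (resto.length : Int)).toNat)
          rwa [e0] at h
        exact e1.trans ((hresto.cons _).trans List.perm_middle.symm)

lemma fold_sim : ∀ (l : List (String × Int)) (grupos : List (List String)) (sumas : List Int)
    (cola : List (Int × Int)), InvB grupos sumas cola →
    l.foldl pasoA (grupos.zip sumas) =
      (l.foldl pasoB (grupos, sumas, cola)).1.zip (l.foldl pasoB (grupos, sumas, cola)).2.1 := by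
  intro l
  induction l with
  | nil => intro _ _ _ _; rfl
  | cons gp t ih =>
      intro grupos sumas cola h
      have hs := step_sim grupos sumas cola gp h
      simp only [List.foldl_cons, hs.1]
      exact ih _ _ _ hs.2

lemma init_inv (ng : Int) :
    InvB ((PySem.List.pyRange 0 ng 1).map (fun _ => ([] : List String)))
      (PySem.List.pyRepeat [(0 : Int)] ng)
      ((PySem.List.pyRange 0 ng 1).map (fun i => ((0 : Int), i))) ∧
    PySem.List.pyRepeat [(([] : List String), (0 : Int))] ng =
      ((PySem.List.pyRange 0 ng 1).map (fun _ => ([] : List String))).zip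
        (PySem.List.pyRepeat [(0 : Int)] ng) := by
  have hq : ∀ (k : Nat) (c n : Int),
      qOf (List.replicate k c) n = (PySem.List.pyRange n (n + k) 1).map (fun i => (c, i)) := by
    intro k
    induction k with
    | zero => intro c n; simp [qOf, PySem.List.pyRange_one_eq_nil]
    | succ k ih =>
        intro c n
        rw [List.replicate_succ]
        show (c, n) :: qOf (List.replicate k c) (n + 1) = _
        rw [ih, show n + ((k + 1 : Nat) : Int) = (n + 1) + (k : Int) by push_cast; ring,
          PySem.List.pyRange_one_cons (a := n) (b := (n + 1) + (k : Int)) (by omega)]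
        simp only [List.map_cons]
  refine ⟨⟨?_, ?_, ?_⟩, ?_⟩
  · simp [PySem.List.pyRepeat_singleton, PySem.List.length_pyRange_one]
  · refine List.Pairwise.map _ ?_ (PySem.List.pairwise_lt_pyRange_one 0 ng)
    intro a b hab
    simp [pvLex, hab]
  · rw [PySem.List.pyRepeat_singleton, hq]
    by_cases h : 0 ≤ ng
    · rw [show (0 : Int) + (ng.toNat : Int) = ng by omega]
    · rw [show ng.toNat = 0 by omega]
      simp [PySem.List.pyRange_one_eq_nil, PySem.List.pyRange_one_eq_nil (by omega : ng ≤ 0)]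
  · rw [PySem.List.pyRepeat_singleton, PySem.List.pyRepeat_singleton, List.map_const',
      List.zip_replicate, PySem.List.length_pyRange_one]
    simp

-- ===== VERDICT (by name: the statement is the Claim_ definition above) =====
theorem aproximacion1_spec : Claim_equal_aproximacion1 := by
  intro maestros ng _ _
  show aproximacion1 maestros ng = aproximacion1_alt maestros ng
  unfold aproximacion1 aproximacion1_alt
  rw [PySem.List.foldl_pyRange_zero_pyGetD' (f := pasoA)]
  have h := init_inv ng
  rw [h.2]
  exact fold_sim _ _ _ _ h.1
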